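-- pv_equiv track=rewrite | github.com/bezhai/chiwei-platform | apps/agent-service/app/runtime/migrator.py | _pg_type_equivalent
-- ===== SOURCE A (Python) =====
-- _PG_TYPE_ALIASES: dict[str, set[str]] = {
--     "TEXT": {"TEXT", "VARCHAR", "CHARACTER VARYING"},
--     "BIGINT": {"BIGINT", "INT8"},
--     "INTEGER": {"INTEGER", "INT", "INT4"},
--     "DOUBLE PRECISION": {"DOUBLE PRECISION", "FLOAT8"},
--     "BOOLEAN": {"BOOLEAN", "BOOL"},
--     "BYTEA": {"BYTEA"},
--     "JSONB": {"JSONB"},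
--     "TIMESTAMPTZ": {"TIMESTAMPTZ", "TIMESTAMP WITH TIME ZONE"},
-- }
--
-- def _pg_type_equivalent(declared: str, actual: str) -> bool:
--     """Check whether two pg type strings name the same underlying type.
--
--     ``declared`` may contain a trailing ``DEFAULT ...`` clause (the
--     migrator composes column specs with defaults). ``actual`` is the
--     introspected column type as reported by the database.
--     """
--     a = declared.split(" DEFAULT ")[0].strip().upper()
--     b = actual.strip().upper()
--     if a == b:
--         return True
--     for aliases in _PG_TYPE_ALIASES.values():
--         if a in aliases and b in aliases:
--             return True
--     return False
-- ===== SOURCE B (Python) =====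
-- _PG_TYPE_ALIASES: dict[str, set[str]] = {
--     "TEXT": {"TEXT", "VARCHAR", "CHARACTER VARYING"},
--     "BIGINT": {"BIGINT", "INT8"},
--     "INTEGER": {"INTEGER", "INT", "INT4"},
--     "DOUBLE PRECISION": {"DOUBLE PRECISION", "FLOAT8"},
--     "BOOLEAN": {"BOOLEAN", "BOOL"},
--     "BYTEA": {"BYTEA"},
--     "JSONB": {"JSONB"},
--     "TIMESTAMPTZ": {"TIMESTAMPTZ", "TIMESTAMP WITH TIME ZONE"},
-- }
--
-- # Inverted index: each alias -> its canonical group name, built once.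
-- _PG_TYPE_CANON: dict[str, str] = {
--     alias: group for group, aliases in _PG_TYPE_ALIASES.items() for alias in aliases
-- }
--
--
-- def _pg_type_equivalent(declared: str, actual: str) -> bool:
--     a = declared.split(" DEFAULT ")[0].strip().upper()
--     b = actual.strip().upper()
--     return _PG_TYPE_CANON.get(a, a) == _PG_TYPE_CANON.get(b, b)
-- ===== Notes on version B (the rewrite author's own statement) =====
-- stated objective: simpler
-- what changed: Replaced the loop over alias sets (membership test of both strings in each set) by a precomputed inverted alias->canonical-group dict and a single comparison of the two canonicalized names.
import Mathlib
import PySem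

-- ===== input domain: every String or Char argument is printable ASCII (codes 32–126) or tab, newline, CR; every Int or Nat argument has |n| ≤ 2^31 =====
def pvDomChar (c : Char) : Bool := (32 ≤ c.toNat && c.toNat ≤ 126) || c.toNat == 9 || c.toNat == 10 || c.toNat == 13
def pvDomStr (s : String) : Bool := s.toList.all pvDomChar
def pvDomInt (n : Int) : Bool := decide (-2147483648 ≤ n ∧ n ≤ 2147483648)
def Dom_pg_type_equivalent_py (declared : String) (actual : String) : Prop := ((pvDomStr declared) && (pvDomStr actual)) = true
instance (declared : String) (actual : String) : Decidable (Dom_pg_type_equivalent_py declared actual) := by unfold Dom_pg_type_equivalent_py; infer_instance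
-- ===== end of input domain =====

-- B replaces A's scan over the alias sets by a precomputed alias -> canonical-group map
-- and one equality test of the canonicalized names (objective: simpler).

-- ===== PORT A =====
def pgAliases : List (String × PySem.Set String) :=
  [("TEXT", PySem.Set.ofList ["TEXT", "VARCHAR", "CHARACTER VARYING"]),
   ("BIGINT", PySem.Set.ofList ["BIGINT", "INT8"]),
   ("INTEGER", PySem.Set.ofList ["INTEGER", "INT", "INT4"]),
   ("DOUBLE PRECISION", PySem.Set.ofList ["DOUBLE PRECISION", "FLOAT8"]),
   ("BOOLEAN", PySem.Set.ofList ["BOOLEAN", "BOOL"]),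
   ("BYTEA", PySem.Set.ofList ["BYTEA"]),
   ("JSONB", PySem.Set.ofList ["JSONB"]),
   ("TIMESTAMPTZ", PySem.Set.ofList ["TIMESTAMPTZ", "TIMESTAMP WITH TIME ZONE"])]

-- declared.split(" DEFAULT ")[0]: the separator is nonempty so split never returns [],
-- hence headD "" is exactly the [0] index.
def pg_type_equivalent_py (declared : String) (actual : String) : Bool :=
  let a := PySem.Str.upper (PySem.Str.strip ((((PySem.Str.split? declared " DEFAULT ").getD []).headD "")))
  let b := PySem.Str.upper (PySem.Str.strip actual)
  if a == b then true
  else (pgAliases.map Prod.snd).any (fun aliases =>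
    PySem.Set.contains aliases a && PySem.Set.contains aliases b)

-- ===== PORT B =====
-- _PG_TYPE_CANON: built once from the alias table (the dict comprehension in Source B).
def pgTypeCanon : PySem.Dict String String :=
  pgAliases.foldl (fun d gs => gs.2.foldl (fun d al => d.insert al gs.1) d) (PySem.Dict.empty : PySem.Dict String String)

def pg_type_equivalent_py_alt (declared : String) (actual : String) : Bool :=
  let a := PySem.Str.upper (PySem.Str.strip ((((PySem.Str.split? declared " DEFAULT ").getD []).headD "")))
  let b := PySem.Str.upper (PySem.Str.strip actual)
  (PySem.Dict.getD pgTypeCanon a a) == (PySem.Dict.getD pgTypeCanon b b)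

-- ===== PRECONDITION & SPEC =====
def Spec_pg_type_equivalent_py (declared : String) (actual : String) (out : Bool) : Prop := out = pg_type_equivalent_py_alt declared actual
instance (declared : String) (actual : String) (out : Bool) : Decidable (Spec_pg_type_equivalent_py declared actual out) := by unfold Spec_pg_type_equivalent_py; infer_instance

-- ===== CLAIM (what is proved, stated in full; the proofs are below) =====
def Claim_equal_pg_type_equivalent_py : Prop := ∀ (declared : String) (actual : String), Dom_pg_type_equivalent_py declared actual → Spec_pg_type_equivalent_py declared actual (pg_type_equivalent_py declared actual)

-- ===== LEMMAS AND PROOFS =====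

-- the 16 alias strings (used only by the proofs, to case-split on membership)
def pgFlat : List String := ["TEXT","VARCHAR","CHARACTER VARYING","BIGINT","INT8","INTEGER","INT","INT4","DOUBLE PRECISION","FLOAT8","BOOLEAN","BOOL","BYTEA","JSONB","TIMESTAMPTZ","TIMESTAMP WITH TIME ZONE"]

-- All 16 x 16 alias-string pairs checked at once (one kernel evaluation).
theorem pg_all : (pgFlat.all (fun a => pgFlat.all (fun b =>
    (if a == b then true
     else (pgAliases.map Prod.snd).any (fun aliases =>
       PySem.Set.contains aliases a && PySem.Set.contains aliases b))
    == ((PySem.Dict.getD pgTypeCanon a a) == (PySem.Dict.getD pgTypeCanon b b))))) = true := by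
  decide

-- every element of every alias set is one of the 16 alias strings
theorem pg_sets_flat : ∀ s ∈ pgAliases.map Prod.snd, ∀ y ∈ s, y ∈ pgFlat := by decide

-- every key of the canonical map is one of the 16 alias strings
theorem pg_keys_flat : ∀ p ∈ PySem.Dict.items pgTypeCanon, p.1 ∈ pgFlat := by decide

-- the canonical name of an alias string is again one of the 16 alias strings
theorem pg_canon_flat : ∀ x ∈ pgFlat, PySem.Dict.getD pgTypeCanon x x ∈ pgFlat := by decide

-- a string that is not an alias maps to itself in the canonical map
theorem pg_canon_notflat (x : String) (hx : x ∉ pgFlat) :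
    PySem.Dict.getD pgTypeCanon x x = x := by
  have hfind : List.find? (fun p => p.1 == x) (PySem.Dict.items pgTypeCanon) = none := by
    apply List.find?_eq_none.mpr
    intro p hp
    rw [Bool.not_eq_true, beq_eq_false_iff_ne]
    intro h
    exact hx (h ▸ pg_keys_flat p hp)
  simp [PySem.Dict.getD, PySem.Dict.get?, hfind]

-- non-alias right argument: the loop finds nothing and the canonical names differ
theorem pg_core_right (a b : String) (hb : b ∉ pgFlat) :
    (if a == b then true
     else (pgAliases.map Prod.snd).any (fun aliases =>
       PySem.Set.contains aliases a && PySem.Set.contains aliases b))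
    = ((PySem.Dict.getD pgTypeCanon a a) == (PySem.Dict.getD pgTypeCanon b b)) := by
  by_cases hab : a = b
  · subst hab; simp
  · have hany : (pgAliases.map Prod.snd).any (fun aliases =>
        PySem.Set.contains aliases a && PySem.Set.contains aliases b) = false := by
      rw [List.any_eq_false]
      intro s hs
      have hbs : b ∉ s := fun hm => hb (pg_sets_flat s hs b hm)
      simp [PySem.Set.contains, hbs]
    have hca : PySem.Dict.getD pgTypeCanon a a ≠ b := by
      by_cases haf : a ∈ pgFlat
      · intro h; exact hb (h ▸ pg_canon_flat a haf)
      · rw [pg_canon_notflat a haf]; exact hab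
    rw [if_neg (by simp [hab]), hany, pg_canon_notflat b hb,
        (beq_eq_false_iff_ne.mpr hca : _)]

-- non-alias left argument (with an alias right argument): symmetric
theorem pg_core_left (a b : String) (ha : a ∉ pgFlat) (hb : b ∈ pgFlat) :
    (if a == b then true
     else (pgAliases.map Prod.snd).any (fun aliases =>
       PySem.Set.contains aliases a && PySem.Set.contains aliases b))
    = ((PySem.Dict.getD pgTypeCanon a a) == (PySem.Dict.getD pgTypeCanon b b)) := by
  have hab : a ≠ b := fun h => ha (h ▸ hb)
  have hany : (pgAliases.map Prod.snd).any (fun aliases =>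
      PySem.Set.contains aliases a && PySem.Set.contains aliases b) = false := by
    rw [List.any_eq_false]
    intro s hs
    have has : a ∉ s := fun hm => ha (pg_sets_flat s hs a hm)
    simp [PySem.Set.contains, has]
  have hca : a ≠ PySem.Dict.getD pgTypeCanon b b :=
    fun h => ha (h ▸ pg_canon_flat b hb)
  rw [if_neg (by simp [hab]), hany, pg_canon_notflat a ha,
      (beq_eq_false_iff_ne.mpr hca : _)]

-- Core fact: on already-normalized names, A's loop over the alias sets and
-- B's comparison of canonical names agree.
theorem pg_core (a b : String) :
    (if a == b then true
     else (pgAliases.map Prod.snd).any (fun aliases =>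
       PySem.Set.contains aliases a && PySem.Set.contains aliases b))
    = ((PySem.Dict.getD pgTypeCanon a a) == (PySem.Dict.getD pgTypeCanon b b)) := by
  by_cases hb : b ∈ pgFlat
  · by_cases ha : a ∈ pgFlat
    · exact eq_of_beq (List.all_eq_true.mp (List.all_eq_true.mp pg_all a ha) b hb)
    · exact pg_core_left a b ha hb
  · exact pg_core_right a b hb

-- ===== VERDICT (by name: the statement is the Claim_ definition above) =====
theorem pg_type_equivalent_py_spec : Claim_equal_pg_type_equivalent_py := by
  intro declared actual _
  unfold Spec_pg_type_equivalent_py pg_type_equivalent_py pg_type_equivalent_py_alt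
  exact pg_core _ _
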